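-- pv_equiv track=rewrite | github.com/TimeLineAnnotator/desktop | tilia/ui/dialogs/harmony_params.py | _extract_prefixed_accidental
-- ===== SOURCE A (Python) =====
-- def _extract_prefixed_accidental(text):
--     if not text:
--         return "", ""
--
--     accidental = ""
--
--     while text and text[0] in ["-", "#", "b"]:
--         accidental += text[0]
--         text = text[1:]
--
--     return text, accidental
-- ===== SOURCE B (Python) =====
-- import re
--
-- def _extract_prefixed_accidental(text):
--     acc = re.match(r'[-#b]*', text).group()
--     return text[len(acc):], acc
-- ===== Notes on version B (the rewrite author's own statement) =====
-- stated objective: idiomatic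
-- what changed: Replaces the manual accumulate-and-reslice while loop with a single regex match that extracts the leading run of accidental characters and slices it off once.
import Mathlib
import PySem

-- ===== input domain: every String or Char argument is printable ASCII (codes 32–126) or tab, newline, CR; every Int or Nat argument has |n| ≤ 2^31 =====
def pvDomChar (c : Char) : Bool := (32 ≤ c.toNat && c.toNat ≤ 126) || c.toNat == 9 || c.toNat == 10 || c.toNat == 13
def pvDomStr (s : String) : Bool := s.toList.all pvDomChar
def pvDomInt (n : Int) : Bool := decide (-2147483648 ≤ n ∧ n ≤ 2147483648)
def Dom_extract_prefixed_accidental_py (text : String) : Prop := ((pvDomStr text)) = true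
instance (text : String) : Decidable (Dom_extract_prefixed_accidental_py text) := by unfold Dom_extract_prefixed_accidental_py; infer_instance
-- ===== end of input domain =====

-- B replaces A's accumulate-and-reslice while loop with a single leading-run pattern
-- match (regex [-#b]*) followed by one slice; objective: idiomatic.

-- ===== PORT A =====
-- the while loop of A: state is (text, accidental), both as char lists
def pvALoop : List Char → List Char → List Char × List Char
  | [], acc => ([], acc)
  | c :: rest, acc =>
      if c = '-' ∨ c = '#' ∨ c = 'b' then pvALoop rest (acc ++ [c])
      else (c :: rest, acc)

def extract_prefixed_accidental_py (text : String) : String × String :=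
  if text.toList = [] then ("", "")
  else
    let p := pvALoop text.toList []
    (String.ofList p.1, String.ofList p.2)

-- ===== PORT B =====
-- re.match(r'[-#b]*', text).group() is exactly the longest leading run of '-','#','b',
-- i.e. takeWhile; text[len(acc):] with 0 ≤ len(acc) ≤ len(text) is exactly drop.
def extract_prefixed_accidental_py_alt (text : String) : String × String :=
  let acc := text.toList.takeWhile (fun c => c = '-' || c = '#' || c = 'b')
  (String.ofList (text.toList.drop acc.length), String.ofList acc)

-- ===== PRECONDITION & SPEC =====
def Spec_extract_prefixed_accidental_py (text : String) (out : String × String) : Prop := out = extract_prefixed_accidental_py_alt text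
instance (text : String) (out : String × String) : Decidable (Spec_extract_prefixed_accidental_py text out) := by unfold Spec_extract_prefixed_accidental_py; infer_instance

-- ===== CLAIM (what is proved, stated in full; the proofs are below) =====
def Claim_equal_extract_prefixed_accidental_py : Prop := ∀ (text : String), Dom_extract_prefixed_accidental_py text → Spec_extract_prefixed_accidental_py text (extract_prefixed_accidental_py text)

-- ===== LEMMAS AND PROOFS =====
theorem pvALoop_eq (l acc : List Char) :
    pvALoop l acc =
      (l.drop (l.takeWhile (fun c => c = '-' || c = '#' || c = 'b')).length,
       acc ++ l.takeWhile (fun c => c = '-' || c = '#' || c = 'b')) := by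
  induction l generalizing acc with
  | nil => simp [pvALoop]
  | cons c rest ih =>
      by_cases h : c = '-' ∨ c = '#' ∨ c = 'b'
      · have hb : (c = '-' || c = '#' || c = 'b') = true := by
          rcases h with h | h | h <;> simp [h]
        simp [pvALoop, h, List.takeWhile, hb, ih]
      · have hb : (c = '-' || c = '#' || c = 'b') = false := by
          simp only [Bool.or_eq_false_iff, decide_eq_false_iff_not]
          refine ⟨⟨?_, ?_⟩, ?_⟩ <;> intro hc <;> exact h (by simp [hc])
        simp [pvALoop, h, List.takeWhile, hb]

-- ===== VERDICT (by name: the statement is the Claim_ definition above) =====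
theorem extract_prefixed_accidental_py_spec : Claim_equal_extract_prefixed_accidental_py := by
  intro text _
  unfold Spec_extract_prefixed_accidental_py extract_prefixed_accidental_py extract_prefixed_accidental_py_alt
  by_cases h : text.toList = []
  · simp [h]
  · simp [h, pvALoop_eq]
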